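-- pv_equiv track=rewrite | github.com/rndviktor2devman/6_password_strength | password_strength.py | rate_case_sensitivity
-- ===== SOURCE A (Python) =====
-- def rate_case_sensitivity(password):
--     last_case = password[0].isupper()
--     count_switches = 0
--     for ch in password:
--         if ch.isupper() != last_case:
--             last_case = ch.isupper()
--             count_switches += 1
--
--     if count_switches < 1:
--         return 1
--     elif count_switches < 4:
--         return 2
--     else:
--         return 3
-- ===== SOURCE B (Python) =====
-- def _count_runs(flags):
--     """Number of maximal runs of equal values: advance past each leading run."""
--     runs = 0
--     i = 0
--     n = len(flags)
--     while i < n: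
--         head = flags[i]
--         i += 1
--         while i < n and flags[i] == head:
--             i += 1
--         runs += 1
--     return runs
--
--
-- def rate_case_sensitivity(password):
--     flags = [ch.isupper() for ch in password]
--     count_switches = _count_runs(flags) - 1
--     if count_switches < 1:
--         return 1
--     elif count_switches < 4:
--         return 2
--     else:
--         return 3
-- ===== Notes on version B (the rewrite author's own statement) =====
-- stated objective: alternative
-- what changed: Instead of A's one-pass state machine tracking last_case and incrementing a counter on each transition, B views the password as runs: it maps it to a list of case flags, counts the maximal runs of equal flags by advancing past each leading run, and sets count_switches = runs - 1 before applying the same thresholds.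
-- crash fix: On the empty string A raises IndexError (password[0]); B returns 1 (zero runs, hence no switches). — e.g. on rate_case_sensitivity(""): A raises IndexError, B returns 1
import Mathlib
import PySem

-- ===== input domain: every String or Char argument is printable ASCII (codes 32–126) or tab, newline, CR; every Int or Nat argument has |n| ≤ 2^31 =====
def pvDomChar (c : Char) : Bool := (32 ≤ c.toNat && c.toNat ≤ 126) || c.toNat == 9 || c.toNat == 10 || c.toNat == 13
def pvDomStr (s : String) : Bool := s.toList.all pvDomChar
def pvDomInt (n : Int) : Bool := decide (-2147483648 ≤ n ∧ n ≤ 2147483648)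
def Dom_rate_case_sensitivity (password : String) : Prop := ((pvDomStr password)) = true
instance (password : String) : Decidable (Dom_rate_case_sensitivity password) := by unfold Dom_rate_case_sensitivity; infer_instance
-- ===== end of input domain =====

-- B replaces A's one-pass last_case/counter state machine by a run-length view:
-- map to case flags, recursively strip the maximal leading run to count runs,
-- count_switches = runs - 1 (alternative decomposition; same thresholds).

-- ===== PORT A =====
-- state machine: (last_case, count_switches); password[0] raises IndexError on ""
def rate_case_sensitivity (password : String) : Int :=
  match PySem.Str.pyGet? password 0 with
  | none => 0  -- IndexError on the empty string; excluded by Pre_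
  | some c0 =>
    let st := password.toList.foldl
      (fun (st : Bool × Int) ch =>
        if PySem.Chars.isupper ch != st.1 then (PySem.Chars.isupper ch, st.2 + 1) else st)
      (PySem.Chars.isupper c0, 0)
    if st.2 < 1 then 1 else if st.2 < 4 then 2 else 3

-- ===== PORT B =====
-- _count_runs: advance past each maximal leading run of equal flags and count it
-- (the index loop over the flag list becomes recursion with dropWhile on the rest)
def pvCountRuns : List Bool → Nat
  | [] => 0
  | h :: t => 1 + pvCountRuns (t.dropWhile (· == h))
termination_by l => l.length
decreasing_by
  simp only [List.length_cons]
  exact Nat.lt_succ_of_le (List.length_dropWhile_le _ _)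

def rate_case_sensitivity_alt (password : String) : Int :=
  let flags := password.toList.map PySem.Chars.isupper
  let count_switches : Int := (pvCountRuns flags : Int) - 1
  if count_switches < 1 then 1 else if count_switches < 4 then 2 else 3

-- ===== PRECONDITION & SPEC =====
-- Pre_ excludes only the empty string, on which A raises IndexError (password[0]).
def Pre_rate_case_sensitivity (password : String) : Prop := password ≠ ""
instance (password : String) : Decidable (Pre_rate_case_sensitivity password) := by unfold Pre_rate_case_sensitivity; infer_instance
def pvWitness_rate_case_sensitivity : String := "aBc"

-- On the empty string A raises IndexError (password[0]); B returns 1 (zero runs, no switches).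
def Raises_rate_case_sensitivity (password : String) : Prop := password = ""
instance (password : String) : Decidable (Raises_rate_case_sensitivity password) := by unfold Raises_rate_case_sensitivity; infer_instance
def pvRaiseWitness_rate_case_sensitivity : String := ""
def pvRaiseWitnessOut_rate_case_sensitivity : Int := 1

def Spec_rate_case_sensitivity (password : String) (out : Int) : Prop := out = rate_case_sensitivity_alt password
instance (password : String) (out : Int) : Decidable (Spec_rate_case_sensitivity password out) := by unfold Spec_rate_case_sensitivity; infer_instance

-- ===== CLAIM (what is proved, stated in full; the proofs are below) =====
def Claim_equal_rate_case_sensitivity : Prop := ∀ (password : String), Dom_rate_case_sensitivity password → Pre_rate_case_sensitivity password → Spec_rate_case_sensitivity password (rate_case_sensitivity password)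
def Claim_raises_rate_case_sensitivity : Prop := (∀ (password : String), Dom_rate_case_sensitivity password → Raises_rate_case_sensitivity password → ¬ Pre_rate_case_sensitivity password) ∧ (Dom_rate_case_sensitivity (pvRaiseWitness_rate_case_sensitivity) ∧ Raises_rate_case_sensitivity (pvRaiseWitness_rate_case_sensitivity) ∧ rate_case_sensitivity_alt (pvRaiseWitness_rate_case_sensitivity) = pvRaiseWitnessOut_rate_case_sensitivity)

-- ===== LEMMAS AND PROOFS =====

-- collapsing a duplicated leading flag does not change the run count
theorem countRuns_dup (b : Bool) (l : List Bool) :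
    pvCountRuns (b :: b :: l) = pvCountRuns (b :: l) := by
  conv_lhs => rw [pvCountRuns]
  conv_rhs => rw [pvCountRuns]
  simp [List.dropWhile]

-- A's fold counter, seeded with flag b and count k, is k + runs(b :: flags) - 1
theorem fold_runs (l : List Char) (b : Bool) (k : Int) :
    (l.foldl
      (fun (st : Bool × Int) ch =>
        if PySem.Chars.isupper ch != st.1 then (PySem.Chars.isupper ch, st.2 + 1) else st)
      (b, k)).2
    = k + (pvCountRuns (b :: l.map PySem.Chars.isupper) : Int) - 1 := by
  induction l generalizing b k with
  | nil => simp [pvCountRuns]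
  | cons d l ih =>
    rw [List.foldl_cons]
    by_cases h : PySem.Chars.isupper d = b
    · have : (PySem.Chars.isupper d != b) = false := by simp [h]
      simp only [this, Bool.false_eq_true, if_false]
      rw [ih b k, List.map_cons, h, countRuns_dup]
    · have : (PySem.Chars.isupper d != b) = true := by simp [h]
      simp only [this, if_true]
      rw [ih (PySem.Chars.isupper d) (k + 1), List.map_cons]
      have hruns : pvCountRuns (b :: PySem.Chars.isupper d :: l.map PySem.Chars.isupper)
          = 1 + pvCountRuns (PySem.Chars.isupper d :: l.map PySem.Chars.isupper) := by
        have hb : (PySem.Chars.isupper d == b) = false := by simp [h]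
        conv_lhs => rw [pvCountRuns]
        simp [List.dropWhile, hb]
      rw [hruns]
      push_cast
      ring

theorem rate_case_eq (password : String) (h : password ≠ "") :
    rate_case_sensitivity password = rate_case_sensitivity_alt password := by
  obtain ⟨c0, rest, hc⟩ : ∃ c0 rest, password.toList = c0 :: rest := by
    cases hl : password.toList with
    | nil => exact absurd (String.toList_eq_nil_iff.mp hl) h
    | cons a l => exact ⟨a, l, rfl⟩
  unfold rate_case_sensitivity rate_case_sensitivity_alt
  have hget : PySem.Str.pyGet? password 0 = some c0 := by
    simp [PySem.Str.pyGet?, PySem.List.pyGet?, PySem.List.pyIdx?, hc]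
  rw [hget]
  simp only [hc]
  rw [fold_runs (c0 :: rest) (PySem.Chars.isupper c0) 0, List.map_cons, countRuns_dup]
  ring_nf

-- ===== VERDICT (by name: the statement is the Claim_ definition above) =====
theorem rate_case_sensitivity_spec : Claim_equal_rate_case_sensitivity := by
  intro password _ hpre
  exact rate_case_eq password hpre

@[simp] theorem rate_case_sensitivity_raises : Claim_raises_rate_case_sensitivity := by
  unfold Claim_raises_rate_case_sensitivity
  refine ⟨fun p _ hr => by simp [Raises_rate_case_sensitivity] at hr; simp [Pre_rate_case_sensitivity, hr], by decide, by decide, ?_⟩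
  simp [rate_case_sensitivity_alt, pvRaiseWitness_rate_case_sensitivity,
    pvRaiseWitnessOut_rate_case_sensitivity, pvCountRuns]
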